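-- pv_equiv track=rewrite | github.com/gchang12/preview | quotes.py | replace_quote
-- ===== SOURCE A (Python) =====
-- def replace_quote(line):
--     k=0
--     new_line=''
--     for word in line:
--         if word == '\"':
--             if not k % 2:
--                 word='``'
--             k+=1
--         new_line+=word
--     return new_line
-- ===== SOURCE B (Python) =====
-- def replace_quote(line):
--     parts = line.split('"')
--     result = parts[0]
--     for i, seg in enumerate(parts[1:]):
--         result += ('``' if i % 2 == 0 else '"') + seg
--     return result
-- ===== Notes on version B (the rewrite author's own statement) =====
-- stated objective: idiomatic
-- what changed: B splits the line at the double-quote character once and rebuilds it from the segments, inserting a backtick pair or a double quote by gap parity, instead of A's char-by-char scan with a toggling counter.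
import Mathlib
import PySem

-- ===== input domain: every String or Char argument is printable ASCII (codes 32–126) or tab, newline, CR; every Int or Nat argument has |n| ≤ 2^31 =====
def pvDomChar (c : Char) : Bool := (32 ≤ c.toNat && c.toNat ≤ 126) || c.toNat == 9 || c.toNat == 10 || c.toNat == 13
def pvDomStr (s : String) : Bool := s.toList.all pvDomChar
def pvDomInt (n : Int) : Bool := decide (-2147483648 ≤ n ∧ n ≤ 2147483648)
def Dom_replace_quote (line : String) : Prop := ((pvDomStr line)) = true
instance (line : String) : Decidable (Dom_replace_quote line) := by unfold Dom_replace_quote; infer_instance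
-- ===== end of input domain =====

-- B rebuilds the line from line.split('"') segments with gap-parity separators, instead of A's char scan with a toggling counter (idiomatic decomposition; same behaviour).


-- ===== PORT A =====
-- char-by-char scan; k counts quotes seen, even-numbered '"' becomes '``'
def replace_quote (line : String) : String :=
  String.mk
    (line.toList.foldl
      (fun (st : Nat × List Char) c =>
        if c == '"' then
          (st.1 + 1, st.2 ++ (if st.1 % 2 == 0 then ['`', '`'] else [c]))
        else (st.1, st.2 ++ [c]))
      (0, [])).2

-- ===== PORT B =====
-- split on '"', rebuild: gap i gets '``' when i is even, '"' when odd
def replace_quote_alt (line : String) : String :=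
  match PySem.Chars.splitOn line.toList ['\"'] with
  | [] => ""   -- unreachable: split always returns at least one piece
  | p :: rest =>
    String.mk
      ((PySem.List.enumerate rest 0).foldl
        (fun acc x => acc ++ (if PySem.Int.mod x.1 2 == 0 then ['`', '`'] else ['"']) ++ x.2)
        p)

-- ===== PRECONDITION & SPEC =====
def Spec_replace_quote (line : String) (out : String) : Prop := out = replace_quote_alt line
instance (line : String) (out : String) : Decidable (Spec_replace_quote line out) := by unfold Spec_replace_quote; infer_instance

-- ===== CLAIM (what is proved, stated in full; the proofs are below) =====
def Claim_equal_replace_quote : Prop := ∀ (line : String), Dom_replace_quote line → Spec_replace_quote line (replace_quote line)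

-- ===== LEMMAS AND PROOFS =====

-- the intended output, scanning from quote-count k
def pvOut : Nat → List Char → List Char
  | _, [] => []
  | k, c :: cs =>
    (if c == '"' then (if k % 2 == 0 then ['`', '`'] else [c]) else [c]) ++
      pvOut (if c == '"' then k + 1 else k) cs

-- split on '"' as (first piece, remaining pieces)
def pvSplit : List Char → List Char × List (List Char)
  | [] => ([], [])
  | c :: cs =>
    let pr := pvSplit cs
    if c == '"' then ([], pr.1 :: pr.2) else (c :: pr.1, pr.2)

-- rebuild the tail pieces, gap counter starting at k
def pvSew : Nat → List (List Char) → List Char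
  | _, [] => []
  | k, seg :: rest => (if k % 2 == 0 then ['`', '`'] else ['"']) ++ seg ++ pvSew (k + 1) rest

theorem pvA_fold (cs : List Char) : ∀ (k : Nat) (acc : List Char),
    (cs.foldl
      (fun (st : Nat × List Char) c =>
        if c == '"' then
          (st.1 + 1, st.2 ++ (if st.1 % 2 == 0 then ['`', '`'] else [c]))
        else (st.1, st.2 ++ [c]))
      (k, acc)).2 = acc ++ pvOut k cs := by
  induction cs with
  | nil => intro k acc; simp [pvOut]
  | cons c cs ih =>
    intro k acc
    cases h : (c == '"') <;>
      simp only [List.foldl_cons, h, Bool.false_eq_true, if_false, if_true, pvOut] <;>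
      rw [ih] <;> simp

theorem pvOut_eq_sew (cs : List Char) : ∀ k : Nat,
    pvOut k cs = (pvSplit cs).1 ++ pvSew k (pvSplit cs).2 := by
  induction cs with
  | nil => intro k; simp [pvOut, pvSplit, pvSew]
  | cons c cs ih =>
    intro k
    by_cases h : c == '"'
    · by_cases hk : k % 2 == 0 <;>
        simp [pvOut, pvSplit, h, hk, pvSew, ih] <;> simp_all
    · simp [pvOut, pvSplit, h, ih]

theorem pvGo (cs : List Char) : ∀ (fuel : Nat) (cur : List Char) (acc : List (List Char)),
    cs.length ≤ fuel →
    PySem.Chars.splitOn.go ['\"'] fuel cs cur acc =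
      acc.reverse ++ ((cur.reverse ++ (pvSplit cs).1) :: (pvSplit cs).2) := by
  induction cs with
  | nil =>
    intro fuel cur acc _
    cases fuel <;> simp [PySem.Chars.splitOn.go, pvSplit]
  | cons c cs ih =>
    intro fuel cur acc hle
    cases fuel with
    | zero => simp at hle
    | succ f =>
      by_cases h : c = '"'
      · have hpre : List.isPrefixOf ['\"'] (c :: cs) = true := by
          simp [List.isPrefixOf, h]
        simp only [PySem.Chars.splitOn.go, hpre, if_true, List.length_cons, List.length_nil,
          List.drop_succ_cons, List.drop_zero]
        rw [ih f [] (cur.reverse :: acc) (by simpa using hle)]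
        simp [pvSplit, h]
      · have hpre : List.isPrefixOf ['\"'] (c :: cs) = false := by
          simp [List.isPrefixOf]; exact fun hc => absurd hc.symm h
        simp only [PySem.Chars.splitOn.go, hpre, Bool.false_eq_true, if_false]
        rw [ih f (c :: cur) acc (by simpa using hle)]
        simp [pvSplit, h]

theorem pvSplitOn_eq (cs : List Char) :
    PySem.Chars.splitOn cs ['\"'] = (pvSplit cs).1 :: (pvSplit cs).2 := by
  have := pvGo cs (cs.length + 1) [] [] (Nat.le_succ _)
  simpa [PySem.Chars.splitOn] using this

theorem pvMod2 (j : Nat) : (PySem.Int.mod (j : Int) 2 == 0) = (j % 2 == 0) := by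
  have h : PySem.Int.mod (j : Int) ((2 : Nat) : Int) = ((j % 2 : Nat) : Int) :=
    PySem.Int.mod_natCast j 2
  simp only [Nat.cast_ofNat] at h
  rw [h]
  by_cases hj : j % 2 = 0 <;> simp [hj]
  omega

theorem pvB_fold (rest : List (List Char)) : ∀ (j : Nat) (acc : List Char),
    (PySem.List.enumerate rest (j : Int)).foldl
      (fun acc x => acc ++ (if PySem.Int.mod x.1 2 == 0 then ['`', '`'] else ['"']) ++ x.2)
      acc = acc ++ pvSew j rest := by
  induction rest with
  | nil => intro j acc; simp [PySem.List.enumerate, pvSew]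
  | cons seg rest ih =>
    intro j acc
    have hcast : ((j : Int) + 1) = ((j + 1 : Nat) : Int) := by push_cast; ring
    simp only [PySem.List.enumerate, List.foldl, hcast, ih, pvSew, pvMod2]
    by_cases hj : j % 2 == 0 <;> simp [hj, List.append_assoc]

-- ===== VERDICT (by name: the statement is the Claim_ definition above) =====
theorem replace_quote_spec : Claim_equal_replace_quote := by
  intro line _
  unfold Spec_replace_quote replace_quote replace_quote_alt
  have hb := pvB_fold (pvSplit line.toList).2 0 (pvSplit line.toList).1
  simp only [Nat.cast_zero] at hb
  simp only [pvSplitOn_eq]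
  rw [hb, pvA_fold line.toList 0 [], pvOut_eq_sew, List.nil_append]
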